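-- pv_equiv track=rewrite | github.com/sathvikn/bert-wordsense | codebase/clustering.py | recode_labels
-- ===== SOURCE A (Python) =====
-- def recode_labels(true_labels):
--     seen = {}
--     senses_as_nums = []
--     label_num = 0
--     for l in true_labels:
--         if l not in seen:
--             seen[l] = label_num
--             label_num += 1
--         senses_as_nums.append(seen[l])
--     return senses_as_nums
-- ===== SOURCE B (Python) =====
-- def recode_labels(true_labels):
--     # id of l = number of distinct labels strictly before the first occurrence of l
--     return [len(set(true_labels[:true_labels.index(l)])) for l in true_labels]
-- ===== Notes on version B (the rewrite author's own statement) =====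
-- stated objective: alternative
-- what changed: Replaces A's incremental dict-and-counter loop by a per-element closed form with no mapping table at all: each label's id is computed independently as the number of distinct labels in the slice before its first occurrence (len(set(tl[:tl.index(l)]))).
import Mathlib
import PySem

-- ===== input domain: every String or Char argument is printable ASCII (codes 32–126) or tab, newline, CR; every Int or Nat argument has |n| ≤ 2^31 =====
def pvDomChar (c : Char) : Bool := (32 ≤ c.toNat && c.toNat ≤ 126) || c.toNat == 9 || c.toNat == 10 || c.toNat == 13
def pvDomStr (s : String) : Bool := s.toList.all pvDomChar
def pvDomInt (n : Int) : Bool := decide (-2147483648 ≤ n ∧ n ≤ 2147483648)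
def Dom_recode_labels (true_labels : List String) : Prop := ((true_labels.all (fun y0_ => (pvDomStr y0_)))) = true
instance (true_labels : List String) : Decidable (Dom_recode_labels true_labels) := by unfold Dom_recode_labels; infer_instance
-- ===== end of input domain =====

-- B replaces A's incremental dict-and-counter loop by a per-element closed form with no
-- mapping table: each id is the number of distinct labels before l's first occurrence (alternative).


-- ===== PORT A =====
-- one pass: if l unseen, record it under the running counter and bump the counter; append seen[l]
def recode_labels (true_labels : List String) : List Int :=
  (true_labels.foldl
    (fun (st : PySem.Dict String Int × List Int × Int) (l : String) =>
      let st' :=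
        if ¬ st.1.contains l then (st.1.insert l st.2.2, st.2.1, st.2.2 + 1) else st
      -- seen[l]: the key is always present at this point, so the default is never used
      (st'.1, st'.2.1 ++ [(st'.1.get? l).getD 0], st'.2.2))
    (PySem.Dict.empty, [], 0)).2.1

-- ===== PORT B =====
-- [len(set(true_labels[:true_labels.index(l)])) for l in true_labels]
-- true_labels.index(l): l is drawn from true_labels, so index never raises (default unused)
def recode_labels_alt (true_labels : List String) : List Int :=
  true_labels.map (fun l =>
    (((PySem.Set.ofList
        (PySem.List.slice true_labels none
          (some (((PySem.List.index? true_labels l).getD 0 : Nat) : Int)))).length : Nat) : Int))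

-- ===== PRECONDITION & SPEC =====
def Spec_recode_labels (true_labels : List String) (out : List Int) : Prop := out = recode_labels_alt true_labels
instance (true_labels : List String) (out : List Int) : Decidable (Spec_recode_labels true_labels out) := by unfold Spec_recode_labels; infer_instance

-- ===== CLAIM (what is proved, stated in full; the proofs are below) =====
def Claim_equal_recode_labels : Prop := ∀ (true_labels : List String), Dom_recode_labels true_labels → Spec_recode_labels true_labels (recode_labels true_labels)

-- ===== LEMMAS AND PROOFS =====

-- the loop body of port A, named so the lemmas can speak about it
def stepA (st : PySem.Dict String Int × List Int × Int) (l : String) :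
    PySem.Dict String Int × List Int × Int :=
  let st' :=
    if ¬ st.1.contains l then (st.1.insert l st.2.2, st.2.1, st.2.2 + 1) else st
  (st'.1, st'.2.1 ++ [(st'.1.get? l).getD 0], st'.2.2)

theorem recode_labels_eq_foldl_stepA (true_labels : List String) :
    recode_labels true_labels =
      (true_labels.foldl stepA (PySem.Dict.empty, [], 0)).2.1 := rfl

-- reference ids: ds = distinct labels seen so far, in first-appearance order
def canonIds (ds : List String) : List String → List Int
  | [] => []
  | l :: xs =>
      (if l ∈ ds then ((ds.idxOf l : Nat) : Int) else ((ds.length : Nat) : Int)) ::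
        canonIds (if l ∈ ds then ds else ds ++ [l]) xs

-- A's loop computes canonIds, given that `seen` tabulates first-occurrence indices of ds
theorem foldl_stepA_eq_canonIds (xs : List String) :
    ∀ (ds : List String) (seen : PySem.Dict String Int) (acc : List Int) (n : Int),
      (∀ l, seen.get? l = if l ∈ ds then some ((ds.idxOf l : Nat) : Int) else none) →
      n = (ds.length : Int) →
      (xs.foldl stepA (seen, acc, n)).2.1 = acc ++ canonIds ds xs := by
  induction xs with
  | nil => intro ds seen acc n _ _; simp [canonIds]
  | cons l xs ih =>
      intro ds seen acc n hseen hn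
      subst hn
      have hcont : seen.contains l = (seen.get? l).isSome :=
        PySem.Dict.contains_eq_isSome_get? seen l
      by_cases hmem : l ∈ ds
      · -- l already seen: dict and counter unchanged
        have hc : seen.contains l = true := by
          rw [hcont, hseen l]; simp [hmem]
        have hstep : stepA (seen, acc, (ds.length : Int)) l =
            (seen, acc ++ [((ds.idxOf l : Nat) : Int)], (ds.length : Int)) := by
          simp [stepA, hc, hseen l, hmem]
        rw [List.foldl_cons, hstep, ih ds seen _ _ hseen rfl]
        simp [canonIds, hmem]
      · -- new label: insert it at index n = ds.length
        have hc : seen.contains l = false := by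
          rw [hcont, hseen l]; simp [hmem]
        have hstep : stepA (seen, acc, (ds.length : Int)) l =
            (seen.insert l (ds.length : Int), acc ++ [(ds.length : Int)], (ds.length : Int) + 1) := by
          simp [stepA, hc, PySem.Dict.get?_insert_self]
        have hseen' : ∀ l', (seen.insert l (ds.length : Int)).get? l' =
            if l' ∈ ds ++ [l] then some (((ds ++ [l]).idxOf l' : Nat) : Int) else none := by
          intro l'
          by_cases hl' : l' = l
          · subst hl'
            rw [PySem.Dict.get?_insert_self]
            simp [List.idxOf_append, hmem]
          · rw [PySem.Dict.get?_insert_of_ne seen _ hl', hseen l']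
            by_cases hds : l' ∈ ds
            · simp [hds, List.idxOf_append]
            · simp [hds, hl']
        have hn' : (ds.length : Int) + 1 = (((ds ++ [l]).length : Nat) : Int) := by
          simp only [List.length_append, List.length_cons, List.length_nil]
          push_cast; ring
        rw [List.foldl_cons, hstep, ih (ds ++ [l]) _ _ _ hseen' hn']
        simp [canonIds, hmem]

-- appending to the seed of the dedup fold only appends on the right
theorem prefix_foldl_add (xs : List String) :
    ∀ ds : List String, ds <+: xs.foldl PySem.Set.add ds := by
  induction xs with
  | nil => intro ds; simp
  | cons x xs ih =>
      intro ds
      refine List.IsPrefix.trans ?_ (ih (PySem.Set.add ds x))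
      by_cases h : x ∈ ds
      · simp [PySem.Set.add, h]
      · simp [PySem.Set.add, h]

-- canonIds is first-occurrence indexing into the completed dedup fold
theorem canonIds_eq_map_idxOf (xs : List String) :
    ∀ ds : List String,
      canonIds ds xs = xs.map (fun l => (((xs.foldl PySem.Set.add ds).idxOf l : Nat) : Int)) := by
  induction xs with
  | nil => intro ds; simp [canonIds]
  | cons l xs ih =>
      intro ds
      have hadd : PySem.Set.add ds l = if l ∈ ds then ds else ds ++ [l] := by
        by_cases h : l ∈ ds
        · simp [PySem.Set.add, h]
        · simp [PySem.Set.add, h]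
      have hpre : (PySem.Set.add ds l) <+: ((l :: xs).foldl PySem.Set.add ds) := by
        simpa using prefix_foldl_add xs (PySem.Set.add ds l)
      obtain ⟨t, ht⟩ := hpre
      have hfold : (l :: xs).foldl PySem.Set.add ds = xs.foldl PySem.Set.add (PySem.Set.add ds l) := by
        simp
      rw [canonIds, ← hadd, ih (PySem.Set.add ds l)]
      have hhead :
          (((xs.foldl PySem.Set.add (PySem.Set.add ds l)).idxOf l : Nat) : Int) =
          (if l ∈ ds then ((ds.idxOf l : Nat) : Int) else ((ds.length : Nat) : Int)) := by
        rw [← hfold, ← ht]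
        by_cases h : l ∈ ds
        · have hmem : l ∈ PySem.Set.add ds l := by rw [hadd]; simp [h]
          rw [List.idxOf_append, if_pos hmem, hadd, if_pos h]
          simp [h]
        · have hmem : l ∈ PySem.Set.add ds l := by rw [hadd]; simp [h]
          rw [List.idxOf_append, if_pos hmem, hadd, if_neg h,
              List.idxOf_append, if_neg h]
          simp [h]
      rw [List.map_cons, hfold, hhead]

-- B's closed form: the distinct count of the prefix before l's first occurrence
-- is l's index in the ordered dedup of the whole list
theorem card_prefix_eq_idxOf_dedup (pre suf : List String) (l : String) (hpre : l ∉ pre) :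
    (PySem.Set.ofList pre).length =
      (PySem.Set.ofList (pre ++ l :: suf)).idxOf l := by
  have h1 : PySem.Set.ofList (pre ++ l :: suf) =
      suf.foldl PySem.Set.add (PySem.Set.add (PySem.Set.ofList pre) l) := by
    simp [PySem.Set.ofList_eq_foldl, List.foldl_append]
  have hnm : l ∉ PySem.Set.ofList pre := by
    intro h; exact hpre ((PySem.Set.mem_ofList pre l).mp h)
  have h2 : PySem.Set.add (PySem.Set.ofList pre) l = PySem.Set.ofList pre ++ [l] := by
    simp [PySem.Set.add, hnm]
  obtain ⟨t, ht⟩ := prefix_foldl_add suf (PySem.Set.add (PySem.Set.ofList pre) l)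
  rw [h1, ← ht, h2, List.append_assoc, List.idxOf_append, if_neg hnm,
      List.singleton_append, List.idxOf_cons_self]
  simp

-- ===== VERDICT (by name: the statement is the Claim_ definition above) =====
theorem recode_labels_spec : Claim_equal_recode_labels := by
  intro true_labels _
  unfold Spec_recode_labels
  rw [recode_labels_eq_foldl_stepA,
      foldl_stepA_eq_canonIds true_labels [] PySem.Dict.empty [] 0
        (by intro l; simp [PySem.Dict.get?, PySem.Dict.empty]) (by simp),
      List.nil_append,
      canonIds_eq_map_idxOf true_labels []]
  unfold recode_labels_alt
  apply List.map_congr_left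
  intro l hl
  have hsome : (PySem.List.index? true_labels l).isSome :=
    (PySem.List.index?_isSome_iff true_labels l).mpr hl
  obtain ⟨k, hk⟩ := Option.isSome_iff_exists.mp hsome
  obtain ⟨pre, suf, heq, hlen, hnm⟩ := (PySem.List.index?_eq_some_iff true_labels l k).mp hk
  rw [hk]
  simp only [Option.getD_some]
  rw [PySem.List.slice_to_natCast, ← hlen, heq, List.take_left]
  have := card_prefix_eq_idxOf_dedup pre suf l hnm
  simp only [PySem.Set.ofList_eq_foldl] at this ⊢
  rw [this]
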